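-- pv_equiv track=rewrite | github.com/BhandarkarPawan/leetcode | intuit-oa-course-dependency-with-disliked.py | count_courses
-- ===== SOURCE A (Python) =====
-- from collections import defaultdict, deque
--
-- def count_courses(disliked, prereqs):
--     # Your code goes here
--     # NOTE: You may use print statements for debugging purposes, but you may
--     #       need to remove them for the tests to pass.
--
--     # create a mapping of courses and dependencies
--     dependency_map = defaultdict(lambda: [])
--     unique_courses = set({})
--
--     for prereq, course in prereqs:
--         dependency_map[prereq].append(course)
--
--         unique_courses.add(course)
--         unique_courses.add(prereq)
--
--     visited = set({})
--     dependency_queue = deque(dependency_map[disliked])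
--     visited.update(dependency_queue)
--
--     while len(dependency_queue):
--         course = dependency_queue.popleft()
--         for dependent_course in dependency_map[course]:
--             if dependent_course not in visited:
--                 visited.add(dependent_course)
--                 dependency_queue.append(dependent_course)
--
--     courses_we_can_take = len(unique_courses) - len(visited) - 1
--     return courses_we_can_take
-- ===== SOURCE B (Python) =====
-- def count_courses(disliked, prereqs):
--     # Edge-relaxation fixpoint instead of map+BFS: no adjacency map, no queue.
--     nodes = set()
--     for u, v in prereqs:
--         nodes.add(u)
--         nodes.add(v)
--     visited = {v for u, v in prereqs if u == disliked}
--     changed = True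
--     while changed:
--         changed = False
--         for u, v in prereqs:
--             if u in visited and v not in visited:
--                 visited.add(v)
--                 changed = True
--     return len(nodes) - len(visited) - 1
-- ===== Notes on version B (the rewrite author's own statement) =====
-- stated objective: alternative
-- what changed: Replaces A's defaultdict adjacency map plus deque BFS with a Bellman-Ford-style fixpoint: repeatedly relax the raw edge list until no new course becomes unreachable-tainted; no map, no queue.
import Mathlib
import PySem

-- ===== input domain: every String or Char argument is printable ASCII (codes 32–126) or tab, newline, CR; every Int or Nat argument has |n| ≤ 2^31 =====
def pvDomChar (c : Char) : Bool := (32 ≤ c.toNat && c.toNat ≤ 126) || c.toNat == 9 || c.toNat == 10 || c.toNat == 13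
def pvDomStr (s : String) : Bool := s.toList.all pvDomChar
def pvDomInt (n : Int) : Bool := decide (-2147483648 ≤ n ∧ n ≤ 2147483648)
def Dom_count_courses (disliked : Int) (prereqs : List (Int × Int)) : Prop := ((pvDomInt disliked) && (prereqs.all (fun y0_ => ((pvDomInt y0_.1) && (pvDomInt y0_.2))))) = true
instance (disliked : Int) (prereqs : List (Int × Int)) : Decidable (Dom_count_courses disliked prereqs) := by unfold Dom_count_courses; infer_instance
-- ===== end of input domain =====

-- B replaces A's adjacency-map + deque BFS with a Bellman-Ford-style edge-relaxation
-- fixpoint over the raw prereq list (objective: alternative, not faster).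

-- ===== PORT A =====
-- number of potential targets (elements of vals) not yet in the set vis: the BFS/relaxation
-- termination measure
def pvMiss (vals : List Int) (vis : PySem.Set Int) : Nat :=
  (vals.toFinset \ vis.toFinset).card

theorem pvMiss_add_lt (vals : List Int) (vis : PySem.Set Int) (d : Int)
    (hd : d ∈ vals) (hnd : d ∉ vis) : pvMiss vals (PySem.Set.add vis d) < pvMiss vals vis := by
  unfold pvMiss
  have hsub : vals.toFinset \ (PySem.Set.add vis d).toFinset ⊆ vals.toFinset \ vis.toFinset := by
    intro x hx
    simp only [Finset.mem_sdiff, List.mem_toFinset, PySem.Set.mem_add] at *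
    exact ⟨hx.1, fun h => hx.2 (Or.inl h)⟩
  refine Finset.card_lt_card ((Finset.ssubset_iff_of_subset hsub).mpr ⟨d, ?_, ?_⟩)
  · simp [Finset.mem_sdiff, List.mem_toFinset, hd, hnd]
  · simp [Finset.mem_sdiff, List.mem_toFinset, PySem.Set.mem_add]

-- inner 'for dependent_course in dependency_map[course]' body of A's while loop
def pvBfsStep (st : PySem.Set Int × List Int) (d : Int) : PySem.Set Int × List Int :=
  if PySem.Set.contains st.1 d then st else (PySem.Set.add st.1 d, st.2 ++ [d])

theorem pvBfsFold_measure (vals : List Int) (ds : List Int) :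
    (∀ d ∈ ds, d ∈ vals) →
    ∀ (vis : PySem.Set Int) (q : List Int),
      2 * pvMiss vals (ds.foldl pvBfsStep (vis, q)).1 + (ds.foldl pvBfsStep (vis, q)).2.length ≤
        2 * pvMiss vals vis + q.length := by
  induction ds with
  | nil => intro _ vis q; simp
  | cons d ds ih =>
    intro hds vis q
    simp only [List.foldl_cons, pvBfsStep]
    by_cases hc : PySem.Set.contains vis d = true
    · simp only [hc, if_true]
      exact ih (fun x hx => hds x (List.mem_cons_of_mem _ hx)) vis q
    · simp only [hc, if_false, Bool.false_eq_true]
      have hlt : pvMiss vals (PySem.Set.add vis d) < pvMiss vals vis :=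
        pvMiss_add_lt vals vis d (hds d (List.mem_cons_self))
          (fun h => hc ((PySem.Set.contains_iff _ _).mpr h))
      have h := ih (fun x hx => hds x (List.mem_cons_of_mem _ hx)) (PySem.Set.add vis d) (q ++ [d])
      simp only [List.length_append, List.length_cons, List.length_nil] at h
      omega

theorem pvMem_getD_flatten_values (dmap : PySem.Dict Int (List Int)) (c x : Int)
    (h : x ∈ PySem.Dict.getD dmap c []) : x ∈ dmap.values.flatten := by
  rcases hg : PySem.Dict.get? dmap c with _ | v
  · rw [PySem.Dict.getD_of_get?_eq_none _ _ hg] at h; cases h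
  · rw [PySem.Dict.getD_of_get?_eq_some _ _ hg] at h
    have hv : (c, v) ∈ dmap.items := PySem.Dict.mem_items_of_get?_eq_some _ hg
    exact List.mem_flatten.mpr ⟨v, List.mem_map.mpr ⟨(c, v), hv, rfl⟩, h⟩

-- A's while loop over the deque (pop head, push unvisited dependents)
def pvBfsLoop (dmap : PySem.Dict Int (List Int)) (visited : PySem.Set Int) (queue : List Int) :
    PySem.Set Int :=
  match queue with
  | [] => visited
  | c :: rest =>
      let st := (PySem.Dict.getD dmap c []).foldl pvBfsStep (visited, rest)
      pvBfsLoop dmap st.1 st.2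
termination_by 2 * pvMiss dmap.values.flatten visited + queue.length
decreasing_by
  have h := pvBfsFold_measure dmap.values.flatten (PySem.Dict.getD dmap c [])
      (fun d hd => pvMem_getD_flatten_values dmap c d hd) visited rest
  simp only [List.length_cons]
  omega

-- A; reading dependency_map[disliked] on the defaultdict is ported as getD (the [] it may
-- insert for a missing key changes no later lookup and no value element)
def count_courses (disliked : Int) (prereqs : List (Int × Int)) : Int :=
  let st :=
    prereqs.foldl
      (fun (st : PySem.Dict Int (List Int) × PySem.Set Int) p =>
        (PySem.Dict.modify st.1 p.1 [] (fun l => l ++ [p.2]),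
         PySem.Set.add (PySem.Set.add st.2 p.2) p.1))
      (PySem.Dict.empty, PySem.Set.empty)
  let dependency_map := st.1
  let unique_courses := st.2
  let dependency_queue : List Int := PySem.Dict.getD dependency_map disliked []
  let visited : PySem.Set Int := PySem.Set.update PySem.Set.empty dependency_queue
  let visitedF := pvBfsLoop dependency_map visited dependency_queue
  (unique_courses.length : Int) - (visitedF.length : Int) - 1

-- ===== PORT B =====
-- body of B's 'for u, v in prereqs' relaxation pass
def pvSatStep (st : PySem.Set Int × Bool) (p : Int × Int) : PySem.Set Int × Bool :=
  if PySem.Set.contains st.1 p.1 && !PySem.Set.contains st.1 p.2 then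
    (PySem.Set.add st.1 p.2, true)
  else st

def pvSatPass (prereqs : List (Int × Int)) (st : PySem.Set Int × Bool) : PySem.Set Int × Bool :=
  prereqs.foldl pvSatStep st

theorem pvSatFold_measure (vals : List Int) (ds : List (Int × Int)) :
    (∀ p ∈ ds, p.2 ∈ vals) →
    ∀ (vis : PySem.Set Int) (b : Bool),
      pvMiss vals (ds.foldl pvSatStep (vis, b)).1 ≤ pvMiss vals vis ∧
      ((ds.foldl pvSatStep (vis, b)).2 = true → b = true ∨
        pvMiss vals (ds.foldl pvSatStep (vis, b)).1 < pvMiss vals vis) := by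
  induction ds with
  | nil => intro _ vis b; exact ⟨le_refl _, fun h => Or.inl h⟩
  | cons p ds ih =>
    intro hds vis b
    simp only [List.foldl_cons, pvSatStep]
    by_cases hc : (PySem.Set.contains vis p.1 && !PySem.Set.contains vis p.2) = true
    · simp only [hc, if_true]
      have hnm : p.2 ∉ vis := by
        intro hm
        simp only [Bool.and_eq_true, Bool.not_eq_true'] at hc
        exact absurd ((PySem.Set.contains_iff vis p.2).mpr hm) (by rw [hc.2]; simp)
      have hlt : pvMiss vals (PySem.Set.add vis p.2) < pvMiss vals vis :=
        pvMiss_add_lt vals vis p.2 (hds p List.mem_cons_self) hnm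
      have h := ih (fun x hx => hds x (List.mem_cons_of_mem _ hx)) (PySem.Set.add vis p.2) true
      exact ⟨le_trans h.1 (le_of_lt hlt), fun _ => Or.inr (lt_of_le_of_lt h.1 hlt)⟩
    · simp only [hc, if_false, Bool.false_eq_true]
      exact ih (fun x hx => hds x (List.mem_cons_of_mem _ hx)) vis b

-- B's 'while changed' loop
def pvSatLoop (prereqs : List (Int × Int)) (visited : PySem.Set Int) : PySem.Set Int :=
  let st := pvSatPass prereqs (visited, false)
  if st.2 then pvSatLoop prereqs st.1 else st.1
termination_by pvMiss (prereqs.map Prod.snd) visited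
decreasing_by
  have h := pvSatFold_measure (prereqs.map Prod.snd) prereqs
      (fun p hp => List.mem_map_of_mem hp) visited false
  rename_i hst
  rcases h.2 hst with h' | h'
  · exact absurd h' (by simp)
  · exact h'

def count_courses_alt (disliked : Int) (prereqs : List (Int × Int)) : Int :=
  let nodes : PySem.Set Int :=
    prereqs.foldl (fun s p => PySem.Set.add (PySem.Set.add s p.1) p.2) PySem.Set.empty
  let visited0 : PySem.Set Int :=
    PySem.Set.ofList ((prereqs.filter (fun p => p.1 == disliked)).map Prod.snd)
  let visitedF := pvSatLoop prereqs visited0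
  (nodes.length : Int) - (visitedF.length : Int) - 1

-- ===== PRECONDITION & SPEC =====
def Spec_count_courses (disliked : Int) (prereqs : List (Int × Int)) (out : Int) : Prop := out = count_courses_alt disliked prereqs
instance (disliked : Int) (prereqs : List (Int × Int)) (out : Int) : Decidable (Spec_count_courses disliked prereqs out) := by unfold Spec_count_courses; infer_instance

-- ===== CLAIM (what is proved, stated in full; the proofs are below) =====
def Claim_equal_count_courses : Prop := ∀ (disliked : Int) (prereqs : List (Int × Int)), Dom_count_courses disliked prereqs → Spec_count_courses disliked prereqs (count_courses disliked prereqs)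

-- ===== LEMMAS AND PROOFS =====

-- reachability from `disliked` in ≥ 1 step along prereq edges
def pvR (disliked : Int) (prereqs : List (Int × Int)) (v : Int) : Prop :=
  Relation.TransGen (fun a b => (a, b) ∈ prereqs) disliked v

-- the dependency map A builds, in isolation
def pvDmap (prereqs : List (Int × Int)) : PySem.Dict Int (List Int) :=
  prereqs.foldl (fun d p => PySem.Dict.modify d p.1 [] (fun l => l ++ [p.2])) PySem.Dict.empty

theorem pvFoldl_prod {α β γ : Type} (f : α → γ → α) (g : β → γ → β) (l : List γ) :
    ∀ (a : α) (b : β),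
      l.foldl (fun st c => (f st.1 c, g st.2 c)) (a, b) = (l.foldl f a, l.foldl g b) := by
  induction l with
  | nil => intro a b; rfl
  | cons c l ih => intro a b; simp only [List.foldl_cons]; exact ih (f a c) (g b c)

theorem pvGetD_dmap (prereqs : List (Int × Int)) (c : Int) :
    PySem.Dict.getD (pvDmap prereqs) c [] = (prereqs.filter (fun p => p.1 == c)).map Prod.snd := by
  unfold pvDmap
  rw [PySem.Dict.getD_foldl_modify_append]
  simp [PySem.Dict.getD_empty]

theorem pvMem_getD_dmap (prereqs : List (Int × Int)) (c x : Int) :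
    x ∈ PySem.Dict.getD (pvDmap prereqs) c [] ↔ (c, x) ∈ prereqs := by
  rw [pvGetD_dmap]
  simp only [List.mem_map, List.mem_filter, beq_iff_eq]
  constructor
  · rintro ⟨p, ⟨hp, h1⟩, h2⟩
    have : p = (c, x) := by cases p; simp_all
    rw [this] at hp; exact hp
  · intro h; exact ⟨(c, x), ⟨h, rfl⟩, rfl⟩

theorem pvBfsFold_spec (ds : List Int) :
    ∀ (vis : PySem.Set Int) (q : List Int),
      (∀ x ∈ vis, x ∈ (ds.foldl pvBfsStep (vis, q)).1) ∧
      (∀ x ∈ (ds.foldl pvBfsStep (vis, q)).1, x ∈ vis ∨ x ∈ ds) ∧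
      (∀ d ∈ ds, d ∈ (ds.foldl pvBfsStep (vis, q)).1) ∧
      (∀ x ∈ (ds.foldl pvBfsStep (vis, q)).1, x ∈ vis ∨ x ∈ (ds.foldl pvBfsStep (vis, q)).2) ∧
      (∀ x ∈ q, x ∈ (ds.foldl pvBfsStep (vis, q)).2) ∧
      (vis.Nodup → (ds.foldl pvBfsStep (vis, q)).1.Nodup) ∧
      (∀ x ∈ (ds.foldl pvBfsStep (vis, q)).2, x ∈ q ∨ x ∈ (ds.foldl pvBfsStep (vis, q)).1) := by
  induction ds with
  | nil =>
    intro vis q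
    simp only [List.foldl_nil]
    exact ⟨fun x h => h, fun x h => Or.inl h, by simp, fun x h => Or.inl h,
      fun x h => h, fun h => h, fun x h => Or.inl h⟩
  | cons d ds ih =>
    intro vis q
    simp only [List.foldl_cons, pvBfsStep]
    by_cases hc : PySem.Set.contains vis d = true
    · simp only [hc, if_true]
      obtain ⟨m1, m2, m3, m4, m5, m6, m7⟩ := ih vis q
      have hdv : d ∈ vis := (PySem.Set.contains_iff vis d).mp hc
      refine ⟨m1, fun x h => (m2 x h).imp id (List.mem_cons_of_mem _), fun e he => ?_,
        m4, m5, m6, m7⟩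
      rcases List.mem_cons.mp he with rfl | he'
      · exact m1 e hdv
      · exact m3 e he'
    · simp only [hc, if_false, Bool.false_eq_true]
      obtain ⟨m1, m2, m3, m4, m5, m6, m7⟩ := ih (PySem.Set.add vis d) (q ++ [d])
      refine ⟨?_, ?_, ?_, ?_, ?_, ?_, ?_⟩
      · intro x hx; exact m1 x ((PySem.Set.mem_add vis d x).mpr (Or.inl hx))
      · intro x hx
        rcases m2 x hx with h | h
        · rcases (PySem.Set.mem_add vis d x).mp h with h' | rfl
          · exact Or.inl h'
          · exact Or.inr List.mem_cons_self
        · exact Or.inr (List.mem_cons_of_mem _ h)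
      · intro e he
        rcases List.mem_cons.mp he with rfl | he'
        · exact m1 e ((PySem.Set.mem_add vis e e).mpr (Or.inr rfl))
        · exact m3 e he'
      · intro x hx
        rcases m4 x hx with h | h
        · rcases (PySem.Set.mem_add vis d x).mp h with h' | rfl
          · exact Or.inl h'
          · exact Or.inr (m5 x (by simp))
        · exact Or.inr h
      · intro x hx; exact m5 x (by simp [hx])
      · intro hn; exact m6 (PySem.Set.nodup_add vis d hn)
      · intro x hx
        rcases m7 x hx with h | h
        · rcases List.mem_append.mp h with h' | h'
          · exact Or.inl h'
          · have hxd : x = d := by simpa using h'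
            exact Or.inr (hxd ▸ m1 d ((PySem.Set.mem_add vis d d).mpr (Or.inr rfl)))
        · exact Or.inr h

theorem pvBfsLoop_spec (dmap : PySem.Dict Int (List Int)) (s : Int)
    (visited : PySem.Set Int) (queue : List Int)
    (hnd : visited.Nodup)
    (hsound : ∀ v ∈ visited, Relation.TransGen (fun a b => b ∈ PySem.Dict.getD dmap a []) s v)
    (hq : ∀ c ∈ queue, c ∈ visited)
    (hcl : ∀ v ∈ visited, v ∉ queue → ∀ w ∈ PySem.Dict.getD dmap v [], w ∈ visited) :
    (pvBfsLoop dmap visited queue).Nodup ∧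
    (∀ v ∈ pvBfsLoop dmap visited queue,
        Relation.TransGen (fun a b => b ∈ PySem.Dict.getD dmap a []) s v) ∧
    (∀ v ∈ visited, v ∈ pvBfsLoop dmap visited queue) ∧
    (∀ v ∈ pvBfsLoop dmap visited queue, ∀ w ∈ PySem.Dict.getD dmap v [],
        w ∈ pvBfsLoop dmap visited queue) := by
  induction visited, queue using pvBfsLoop.induct dmap with
  | case1 visited =>
    rw [pvBfsLoop]
    exact ⟨hnd, hsound, fun v hv => hv, fun v hv => hcl v hv (by simp)⟩
  | case2 visited c rest st ih =>
    rw [pvBfsLoop]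
    obtain ⟨m1, m2, m3, m4, m5, m6, m7⟩ := pvBfsFold_spec (PySem.Dict.getD dmap c []) visited rest
    have hc : c ∈ visited := hq c List.mem_cons_self
    have hnd' : st.1.Nodup := m6 hnd
    have hsound' : ∀ v ∈ st.1, Relation.TransGen (fun a b => b ∈ PySem.Dict.getD dmap a []) s v := by
      intro v hv
      rcases m2 v hv with h | h
      · exact hsound v h
      · exact Relation.TransGen.tail (hsound c hc) h
    have hq' : ∀ x ∈ st.2, x ∈ st.1 := by
      intro x hx
      rcases m7 x hx with h | h
      · exact m1 x (hq x (List.mem_cons_of_mem _ h))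
      · exact h
    have hcl' : ∀ v ∈ st.1, v ∉ st.2 → ∀ w ∈ PySem.Dict.getD dmap v [], w ∈ st.1 := by
      intro v hv hvq w hw
      have hvvis : v ∈ visited := by
        rcases m4 v hv with h | h
        · exact h
        · exact absurd h hvq
      by_cases hvc : v = c
      · exact m3 w (hvc ▸ hw)
      · have hvrest : v ∉ rest := fun h => hvq (m5 v h)
        have : v ∉ c :: rest := by
          intro h; rcases List.mem_cons.mp h with h' | h'
          · exact hvc h'
          · exact hvrest h'
        exact m1 w (hcl v hvvis this w hw)
    obtain ⟨r1, r2, r3, r4⟩ := ih hnd' hsound' hq' hcl'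
    exact ⟨r1, r2, fun v hv => r3 v (m1 v hv), r4⟩

theorem pvBfs_final (disliked : Int) (prereqs : List (Int × Int)) :
    (pvBfsLoop (pvDmap prereqs)
        (PySem.Set.update PySem.Set.empty (PySem.Dict.getD (pvDmap prereqs) disliked []))
        (PySem.Dict.getD (pvDmap prereqs) disliked [])).Nodup ∧
    (∀ v, v ∈ pvBfsLoop (pvDmap prereqs)
        (PySem.Set.update PySem.Set.empty (PySem.Dict.getD (pvDmap prereqs) disliked []))
        (PySem.Dict.getD (pvDmap prereqs) disliked []) ↔ pvR disliked prereqs v) := by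
  have hv0 : PySem.Set.update PySem.Set.empty (PySem.Dict.getD (pvDmap prereqs) disliked []) =
      PySem.Set.ofList (PySem.Dict.getD (pvDmap prereqs) disliked []) :=
    PySem.Set.update_nil_left _
  obtain ⟨r1, r2, r3, r4⟩ := pvBfsLoop_spec (pvDmap prereqs) disliked
      (PySem.Set.update PySem.Set.empty (PySem.Dict.getD (pvDmap prereqs) disliked []))
      (PySem.Dict.getD (pvDmap prereqs) disliked [])
      (by rw [hv0]; exact PySem.Set.nodup_ofList _)
      (by
        intro v hv
        rw [hv0] at hv
        exact Relation.TransGen.single ((PySem.Set.mem_ofList _ v).mp hv))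
      (by intro c hc; rw [hv0]; exact (PySem.Set.mem_ofList _ c).mpr hc)
      (by
        intro v hv hnq
        rw [hv0] at hv
        exact absurd ((PySem.Set.mem_ofList _ v).mp hv) hnq)
  refine ⟨r1, fun v => ⟨fun hv => ?_, fun hv => ?_⟩⟩
  · exact Relation.TransGen.mono (fun a b h => (pvMem_getD_dmap prereqs a b).mp h) (r2 v hv)
  · unfold pvR at hv
    induction hv with
    | single h =>
      refine r3 _ ?_
      rw [hv0]
      exact (PySem.Set.mem_ofList _ _).mpr ((pvMem_getD_dmap prereqs disliked _).mpr h)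
    | tail hab hbc ih => exact r4 _ ih _ ((pvMem_getD_dmap prereqs _ _).mpr hbc)

theorem pvSatPass_mono (ds : List (Int × Int)) :
    ∀ (vis : PySem.Set Int) (b : Bool) (x : Int), x ∈ vis → x ∈ (ds.foldl pvSatStep (vis, b)).1 := by
  induction ds with
  | nil => intro vis b x hx; exact hx
  | cons p ds ih =>
    intro vis b x hx
    simp only [List.foldl_cons, pvSatStep]
    by_cases hc : (PySem.Set.contains vis p.1 && !PySem.Set.contains vis p.2) = true
    · simp only [hc, if_true]
      exact ih _ _ x ((PySem.Set.mem_add vis p.2 x).mpr (Or.inl hx))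
    · simp only [hc, if_false, Bool.false_eq_true]
      exact ih _ _ x hx

theorem pvSatPass_nodup (ds : List (Int × Int)) :
    ∀ (vis : PySem.Set Int) (b : Bool), vis.Nodup → (ds.foldl pvSatStep (vis, b)).1.Nodup := by
  induction ds with
  | nil => intro vis b h; exact h
  | cons p ds ih =>
    intro vis b h
    simp only [List.foldl_cons, pvSatStep]
    by_cases hc : (PySem.Set.contains vis p.1 && !PySem.Set.contains vis p.2) = true
    · simp only [hc, if_true]
      exact ih _ _ (PySem.Set.nodup_add vis p.2 h)
    · simp only [hc, if_false, Bool.false_eq_true]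
      exact ih _ _ h

theorem pvSatPass_sound (disliked : Int) (prereqs : List (Int × Int)) (ds : List (Int × Int)) :
    (∀ p ∈ ds, p ∈ prereqs) →
    ∀ (vis : PySem.Set Int) (b : Bool), (∀ v ∈ vis, pvR disliked prereqs v) →
      ∀ v ∈ (ds.foldl pvSatStep (vis, b)).1, pvR disliked prereqs v := by
  induction ds with
  | nil => intro _ vis b hs v hv; exact hs v hv
  | cons p ds ih =>
    intro hds vis b hs
    simp only [List.foldl_cons, pvSatStep]
    by_cases hc : (PySem.Set.contains vis p.1 && !PySem.Set.contains vis p.2) = true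
    · simp only [hc, if_true]
      refine ih (fun q hq => hds q (List.mem_cons_of_mem _ hq)) _ _ ?_
      intro v hv
      rcases (PySem.Set.mem_add vis p.2 v).mp hv with h | rfl
      · exact hs v h
      · have hp1 : p.1 ∈ vis := by
          simp only [Bool.and_eq_true] at hc
          exact (PySem.Set.contains_iff vis p.1).mp hc.1
        exact Relation.TransGen.tail (hs p.1 hp1) (by simpa using hds p List.mem_cons_self)
    · simp only [hc, if_false, Bool.false_eq_true]
      exact ih (fun q hq => hds q (List.mem_cons_of_mem _ hq)) _ _ hs

theorem pvSatPass_flag (ds : List (Int × Int)) :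
    ∀ (vis : PySem.Set Int), (ds.foldl pvSatStep (vis, true)).2 = true := by
  induction ds with
  | nil => intro vis; rfl
  | cons p ds ih =>
    intro vis
    simp only [List.foldl_cons, pvSatStep]
    by_cases hc : (PySem.Set.contains vis p.1 && !PySem.Set.contains vis p.2) = true
    · simp only [hc, if_true]; exact ih _
    · simp only [hc, if_false, Bool.false_eq_true]; exact ih _

theorem pvSatPass_stable (ds : List (Int × Int)) :
    ∀ (vis : PySem.Set Int), (ds.foldl pvSatStep (vis, false)).2 = false →
      (ds.foldl pvSatStep (vis, false)).1 = vis ∧ ∀ p ∈ ds, p.1 ∈ vis → p.2 ∈ vis := by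
  induction ds with
  | nil => intro vis _; exact ⟨rfl, by simp⟩
  | cons p ds ih =>
    intro vis hflag
    simp only [List.foldl_cons, pvSatStep] at hflag ⊢
    by_cases hc : (PySem.Set.contains vis p.1 && !PySem.Set.contains vis p.2) = true
    · exfalso
      simp only [hc, if_true] at hflag
      rw [pvSatPass_flag ds _] at hflag
      cases hflag
    · simp only [hc, if_false, Bool.false_eq_true] at hflag ⊢
      obtain ⟨h1, h2⟩ := ih vis hflag
      refine ⟨h1, fun q hq hq1 => ?_⟩
      rcases List.mem_cons.mp hq with rfl | hq'
      · by_contra hq2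
        apply hc
        simp only [Bool.and_eq_true, Bool.not_eq_true']
        exact ⟨(PySem.Set.contains_iff vis q.1).mpr hq1,
          by rw [← Bool.not_eq_true]; intro h; exact hq2 ((PySem.Set.contains_iff vis q.2).mp h)⟩
      · exact h2 q hq' hq1

theorem pvSatLoop_spec (disliked : Int) (prereqs : List (Int × Int)) :
    ∀ (vis : PySem.Set Int), vis.Nodup → (∀ v ∈ vis, pvR disliked prereqs v) →
      (pvSatLoop prereqs vis).Nodup ∧
      (∀ v ∈ pvSatLoop prereqs vis, pvR disliked prereqs v) ∧
      (∀ v ∈ vis, v ∈ pvSatLoop prereqs vis) ∧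
      (∀ p ∈ prereqs, p.1 ∈ pvSatLoop prereqs vis → p.2 ∈ pvSatLoop prereqs vis) := by
  intro vis
  induction vis using pvSatLoop.induct prereqs with
  | case1 vis st hflag ih =>
    intro hnd hsound
    rw [pvSatLoop]
    have hflag' : (pvSatPass prereqs (vis, false)).2 = true := hflag
    simp only [hflag', if_true]
    obtain ⟨r1, r2, r3, r4⟩ := ih (pvSatPass_nodup prereqs vis false hnd)
      (pvSatPass_sound disliked prereqs prereqs (fun p hp => hp) vis false hsound)
    exact ⟨r1, r2, fun v hv => r3 v (pvSatPass_mono prereqs vis false v hv), r4⟩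
  | case2 vis st hflag =>
    intro hnd hsound
    rw [pvSatLoop]
    have hflag' : (pvSatPass prereqs (vis, false)).2 = false := by
      have h : ¬ (pvSatPass prereqs (vis, false)).2 = true := hflag
      exact Bool.not_eq_true _ ▸ h
    simp only [hflag', Bool.false_eq_true, if_false]
    obtain ⟨h1, h2⟩ := pvSatPass_stable prereqs vis hflag'
    rw [show ((pvSatPass prereqs (vis, false)).1 : PySem.Set Int) =
      (prereqs.foldl pvSatStep (vis, false)).1 from rfl, h1]
    exact ⟨hnd, hsound, fun v hv => hv, h2⟩

theorem pvSat_final (disliked : Int) (prereqs : List (Int × Int)) :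
    (pvSatLoop prereqs
        (PySem.Set.ofList ((prereqs.filter (fun p => p.1 == disliked)).map Prod.snd))).Nodup ∧
    (∀ v, v ∈ pvSatLoop prereqs
        (PySem.Set.ofList ((prereqs.filter (fun p => p.1 == disliked)).map Prod.snd)) ↔
        pvR disliked prereqs v) := by
  have hseed : (prereqs.filter (fun p => p.1 == disliked)).map Prod.snd =
      PySem.Dict.getD (pvDmap prereqs) disliked [] := (pvGetD_dmap prereqs disliked).symm
  obtain ⟨r1, r2, r3, r4⟩ := pvSatLoop_spec disliked prereqs
      (PySem.Set.ofList ((prereqs.filter (fun p => p.1 == disliked)).map Prod.snd))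
      (PySem.Set.nodup_ofList _)
      (by
        intro v hv
        have := (PySem.Set.mem_ofList _ v).mp hv
        rw [hseed] at this
        exact Relation.TransGen.single ((pvMem_getD_dmap prereqs disliked v).mp this))
  refine ⟨r1, fun v => ⟨fun hv => r2 v hv, fun hv => ?_⟩⟩
  unfold pvR at hv
  induction hv with
  | single h =>
    refine r3 _ ((PySem.Set.mem_ofList _ _).mpr ?_)
    rw [hseed]
    exact (pvMem_getD_dmap prereqs disliked _).mpr h
  | tail hab hbc ih => exact r4 _ hbc ih

theorem pvMem_unique_a (prereqs : List (Int × Int)) :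
    ∀ (s : PySem.Set Int) (x : Int),
      x ∈ prereqs.foldl (fun s p => PySem.Set.add (PySem.Set.add s p.2) p.1) s ↔
        x ∈ s ∨ ∃ p ∈ prereqs, x = p.1 ∨ x = p.2 := by
  induction prereqs with
  | nil => intro s x; simp
  | cons p l ih =>
    intro s x
    simp only [List.foldl_cons, ih, PySem.Set.mem_add, List.mem_cons]
    constructor
    · rintro (((h | h) | h) | ⟨q, hq, h⟩)
      · exact Or.inl h
      · exact Or.inr ⟨p, Or.inl rfl, Or.inr h⟩
      · exact Or.inr ⟨p, Or.inl rfl, Or.inl h⟩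
      · exact Or.inr ⟨q, Or.inr hq, h⟩
    · rintro (h | ⟨q, (rfl | hq), h⟩)
      · exact Or.inl (Or.inl (Or.inl h))
      · rcases h with h | h
        · exact Or.inl (Or.inr h)
        · exact Or.inl (Or.inl (Or.inr h))
      · exact Or.inr ⟨q, hq, h⟩

theorem pvMem_nodes_b (prereqs : List (Int × Int)) :
    ∀ (s : PySem.Set Int) (x : Int),
      x ∈ prereqs.foldl (fun s p => PySem.Set.add (PySem.Set.add s p.1) p.2) s ↔
        x ∈ s ∨ ∃ p ∈ prereqs, x = p.1 ∨ x = p.2 := by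
  induction prereqs with
  | nil => intro s x; simp
  | cons p l ih =>
    intro s x
    simp only [List.foldl_cons, ih, PySem.Set.mem_add, List.mem_cons]
    constructor
    · rintro (((h | h) | h) | ⟨q, hq, h⟩)
      · exact Or.inl h
      · exact Or.inr ⟨p, Or.inl rfl, Or.inl h⟩
      · exact Or.inr ⟨p, Or.inl rfl, Or.inr h⟩
      · exact Or.inr ⟨q, Or.inr hq, h⟩
    · rintro (h | ⟨q, (rfl | hq), h⟩)
      · exact Or.inl (Or.inl (Or.inl h))
      · rcases h with h | h
        · exact Or.inl (Or.inl (Or.inr h))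
        · exact Or.inl (Or.inr h)
      · exact Or.inr ⟨q, hq, h⟩

theorem pvNodup_unique_a (prereqs : List (Int × Int)) :
    ∀ (s : PySem.Set Int), s.Nodup →
      (prereqs.foldl (fun s p => PySem.Set.add (PySem.Set.add s p.2) p.1) s).Nodup := by
  induction prereqs with
  | nil => intro s h; exact h
  | cons p l ih =>
    intro s h
    exact ih _ (PySem.Set.nodup_add _ p.1 (PySem.Set.nodup_add s p.2 h))

theorem pvNodup_nodes_b (prereqs : List (Int × Int)) :
    ∀ (s : PySem.Set Int), s.Nodup →
      (prereqs.foldl (fun s p => PySem.Set.add (PySem.Set.add s p.1) p.2) s).Nodup := by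
  induction prereqs with
  | nil => intro s h; exact h
  | cons p l ih =>
    intro s h
    exact ih _ (PySem.Set.nodup_add _ p.2 (PySem.Set.nodup_add s p.1 h))

theorem pvLength_eq_of_same_mem (l₁ l₂ : List Int) (h₁ : l₁.Nodup) (h₂ : l₂.Nodup)
    (h : ∀ x, x ∈ l₁ ↔ x ∈ l₂) : l₁.length = l₂.length :=
  ((List.perm_ext_iff_of_nodup h₁ h₂).mpr h).length_eq

-- ===== VERDICT (by name: the statement is the Claim_ definition above) =====
theorem count_courses_spec : Claim_equal_count_courses := by
  intro disliked prereqs _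
  unfold Spec_count_courses count_courses count_courses_alt
  rw [pvFoldl_prod (fun d p => PySem.Dict.modify d p.1 [] (fun l => l ++ [p.2]))
    (fun s p => PySem.Set.add (PySem.Set.add s p.2) p.1) prereqs PySem.Dict.empty PySem.Set.empty]
  have hdm : prereqs.foldl (fun d p => PySem.Dict.modify d p.1 [] (fun l => l ++ [p.2]))
      PySem.Dict.empty = pvDmap prereqs := rfl
  rw [hdm]
  dsimp only
  obtain ⟨bnd, bmem⟩ := pvBfs_final disliked prereqs
  obtain ⟨snd, smem⟩ := pvSat_final disliked prereqs
  have h1 : (prereqs.foldl (fun s p => PySem.Set.add (PySem.Set.add s p.2) p.1)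
      PySem.Set.empty).length =
      (prereqs.foldl (fun s p => PySem.Set.add (PySem.Set.add s p.1) p.2)
      PySem.Set.empty).length := by
    refine pvLength_eq_of_same_mem _ _ (pvNodup_unique_a prereqs _ List.nodup_nil)
      (pvNodup_nodes_b prereqs _ List.nodup_nil) (fun x => ?_)
    rw [pvMem_unique_a prereqs _ x, pvMem_nodes_b prereqs _ x]
  have h2 : (pvBfsLoop (pvDmap prereqs)
      (PySem.Set.update PySem.Set.empty (PySem.Dict.getD (pvDmap prereqs) disliked []))
      (PySem.Dict.getD (pvDmap prereqs) disliked [])).length =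
      (pvSatLoop prereqs
      (PySem.Set.ofList ((prereqs.filter (fun p => p.1 == disliked)).map Prod.snd))).length :=
    pvLength_eq_of_same_mem _ _ bnd snd (fun x => (bmem x).trans (smem x).symm)
  rw [h1, h2]
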